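-- pv_equiv track=rewrite | github.com/nikhilmmahajan/MilesAndMore | migrate_almaden.py | resolve_week_label
-- ===== SOURCE A (Python) =====
-- from typing import Optional
--
-- WEEK_DATE_MAP: dict[str, str] = {
--     "Jan26": "2026-01-26",
--     "Feb02": "2026-02-02",
--     "Feb09": "2026-02-09",
--     "Feb16": "2026-02-16",
--     "Feb23": "2026-02-23",
--     "Mar02": "2026-03-02",
--     "Mar09": "2026-03-09",
--     "Mar16": "2026-03-16",
--     "Mar23": "2026-03-23",
--     "Mar30": "2026-03-30",
--     "Apr06": "2026-04-06",
--     "Apr13": "2026-04-13",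
-- }
--
-- def clean_str(val) -> Optional[str]:
--     v = str(val).strip() if val is not None else ""
--     return v if v and v.lower() not in ("none", "#n/a", "n/a", "—", "-") else None
--
-- def resolve_week_label(raw: str) -> Optional[str]:
--     """
--     Convert any week label/string to a WEEK_DATE_MAP key (e.g. 'Feb09').
--     Handles: 'Feb09', 'Feb09-Feb15', 'Mar02-Mar08-(5K-RUN)', 'Feb02-Feb08', etc.
--     """
--     v = clean_str(raw)
--     if not v:
--         return None
--     # Direct match first
--     if v in WEEK_DATE_MAP:
--         return v
--     # Match any 5-char prefix like 'Feb09' or 'Mar02'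
--     for key in WEEK_DATE_MAP:
--         if v.startswith(key) or v.lower().startswith(key.lower()):
--             return key
--     return None
-- ===== SOURCE B (Python) =====
-- from typing import Optional
--
-- WEEK_DATE_MAP: dict[str, str] = {
--     "Jan26": "2026-01-26",
--     "Feb02": "2026-02-02",
--     "Feb09": "2026-02-09",
--     "Feb16": "2026-02-16",
--     "Feb23": "2026-02-23",
--     "Mar02": "2026-03-02",
--     "Mar09": "2026-03-09",
--     "Mar16": "2026-03-16",
--     "Mar23": "2026-03-23",
--     "Mar30": "2026-03-30",
--     "Apr06": "2026-04-06",
--     "Apr13": "2026-04-13",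
-- }
--
-- # Every key is exactly 5 characters and the lowercased keys are pairwise distinct,
-- # so matching reduces to one indexed lookup of the lowercased 5-char prefix.
-- _PREFIX: dict[str, str] = {k.lower(): k for k in WEEK_DATE_MAP}
--
-- def clean_str(val) -> Optional[str]:
--     v = str(val).strip() if val is not None else ""
--     return v if v and v.lower() not in ("none", "#n/a", "n/a", "—", "-") else None
--
-- def resolve_week_label(raw: str) -> Optional[str]:
--     v = clean_str(raw)
--     if not v:
--         return None
--     return _PREFIX.get(v[:5].lower())
-- ===== Notes on version B (the rewrite author's own statement) =====
-- stated objective: simpler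
-- what changed: Replaces A's exact-membership test plus linear OR-of-startswith scan over the key list by a single get on a precomputed table mapping each key's lowercase form to the key, applied to the lowercased 5-character prefix of the cleaned string (valid because every key is exactly 5 characters and the lowercased keys are distinct).
import Mathlib
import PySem

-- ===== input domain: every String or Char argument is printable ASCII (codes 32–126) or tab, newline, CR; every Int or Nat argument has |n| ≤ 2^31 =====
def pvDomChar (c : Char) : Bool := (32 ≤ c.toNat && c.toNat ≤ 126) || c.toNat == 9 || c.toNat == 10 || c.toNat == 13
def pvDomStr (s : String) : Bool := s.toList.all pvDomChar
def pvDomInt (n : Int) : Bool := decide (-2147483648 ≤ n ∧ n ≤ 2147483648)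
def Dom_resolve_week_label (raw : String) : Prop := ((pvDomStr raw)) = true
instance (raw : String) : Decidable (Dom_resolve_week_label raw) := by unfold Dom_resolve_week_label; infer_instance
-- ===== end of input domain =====

-- B replaces A's exact-match test plus linear prefix scan over the key list by one indexed
-- lookup of the lowercased 5-character prefix in a precomputed lowercase→key table (objective: simpler).

-- ===== PORT A =====
def WEEK_DATE_MAP : PySem.Dict String String := PySem.Dict.ofList
  [("Jan26", "2026-01-26"), ("Feb02", "2026-02-02"), ("Feb09", "2026-02-09"),
   ("Feb16", "2026-02-16"), ("Feb23", "2026-02-23"), ("Mar02", "2026-03-02"),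
   ("Mar09", "2026-03-09"), ("Mar16", "2026-03-16"), ("Mar23", "2026-03-23"),
   ("Mar30", "2026-03-30"), ("Apr06", "2026-04-06"), ("Apr13", "2026-04-13")]

-- clean_str: 'val' here is always a string (raw : String), never None
def clean_str (val : String) : Option String :=
  let v := PySem.Str.strip val
  if !(v == "") && !(["none", "#n/a", "n/a", "—", "-"].contains (PySem.Str.lower v))
  then some v else none

-- 'for key in WEEK_DATE_MAP: if v.startswith(key) or v.lower().startswith(key.lower()): return key'
def prefixScan (v : String) : List String → Option String
  | [] => none
  | k :: ks =>
    if PySem.Str.startswith v k || PySem.Str.startswith (PySem.Str.lower v) (PySem.Str.lower k)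
    then some k else prefixScan v ks

def resolve_week_label (raw : String) : Option String :=
  match clean_str raw with
  | none => none
  | some v =>
    if v == "" then none
    else if WEEK_DATE_MAP.contains v then some v
    else prefixScan v WEEK_DATE_MAP.keys

-- ===== PORT B =====
-- _PREFIX = {k.lower(): k for k in WEEK_DATE_MAP}
def PREFIX_TABLE : PySem.Dict String String :=
  WEEK_DATE_MAP.keys.foldl (fun d k => d.insert (PySem.Str.lower k) k) PySem.Dict.empty

def resolve_week_label_alt (raw : String) : Option String :=
  match clean_str raw with
  | none => none
  | some v =>
    if v == "" then none
    else PREFIX_TABLE.get? (PySem.Str.lower (PySem.Str.slice v none (some 5)))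

-- ===== PRECONDITION & SPEC =====
def Spec_resolve_week_label (raw : String) (out : Option String) : Prop := out = resolve_week_label_alt raw
instance (raw : String) (out : Option String) : Decidable (Spec_resolve_week_label raw out) := by unfold Spec_resolve_week_label; infer_instance

-- ===== CLAIM (what is proved, stated in full; the proofs are below) =====
def Claim_equal_resolve_week_label : Prop := ∀ (raw : String), Dom_resolve_week_label raw → Spec_resolve_week_label raw (resolve_week_label raw)

-- ===== LEMMAS AND PROOFS =====

-- a 5-element list is a prefix (directly, or after mapping f) iff its image is the take-5 of the image
lemma prefix5_iff {f : Char → Char} (L K : List Char) (hK : K.length = 5) :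
    (K <+: L ∨ K.map f <+: L.map f) ↔ K.map f = (L.map f).take 5 := by
  constructor
  · rintro (h | h)
    · have h' := h.map f
      rw [List.prefix_iff_eq_take, List.length_map, hK] at h'
      exact h'
    · rw [List.prefix_iff_eq_take, List.length_map, hK] at h
      exact h
  · intro h
    exact Or.inr (h ▸ List.take_prefix 5 (L.map f))

-- A's per-key test equals B's per-key test (lowercased 5-char prefix comparison)
lemma cond_eq (v k : String) (hk : k.toList.length = 5) :
    (PySem.Str.startswith v k || PySem.Str.startswith (PySem.Str.lower v) (PySem.Str.lower k))
    = (PySem.Str.lower k == PySem.Str.lower (PySem.Str.slice v none (some 5))) := by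
  rw [Bool.eq_iff_iff]
  simp only [Bool.or_eq_true, beq_iff_eq, String.ext_iff]
  simp only [PySem.Str.startswith_eq, PySem.Chars.startswith_iff, PySem.Str.toList_lower,
    PySem.Str.toList_slice, PySem.Chars.slice_eq_listSlice, PySem.Chars.lower]
  rw [PySem.List.slice_to v.toList (by norm_num : (0:Int) ≤ 5)]
  rw [List.map_take]
  exact prefix5_iff v.toList k.toList hk

-- the key list of the literal dict
lemma keys_eq : WEEK_DATE_MAP.keys =
    ["Jan26", "Feb02", "Feb09", "Feb16", "Feb23", "Mar02",
     "Mar09", "Mar16", "Mar23", "Mar30", "Apr06", "Apr13"] := by rfl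

-- the item list of the literal dict
lemma items_eq : WEEK_DATE_MAP.items =
  [("Jan26", "2026-01-26"), ("Feb02", "2026-02-02"), ("Feb09", "2026-02-09"),
   ("Feb16", "2026-02-16"), ("Feb23", "2026-02-23"), ("Mar02", "2026-03-02"),
   ("Mar09", "2026-03-09"), ("Mar16", "2026-03-16"), ("Mar23", "2026-03-23"),
   ("Mar30", "2026-03-30"), ("Apr06", "2026-04-06"), ("Apr13", "2026-04-13")] := by rfl

-- the prefix table evaluates to this literal dict
lemma tableP : PREFIX_TABLE = PySem.Dict.mk
  [("jan26", "Jan26"), ("feb02", "Feb02"), ("feb09", "Feb09"), ("feb16", "Feb16"),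
   ("feb23", "Feb23"), ("mar02", "Mar02"), ("mar09", "Mar09"), ("mar16", "Mar16"),
   ("mar23", "Mar23"), ("mar30", "Mar30"), ("apr06", "Apr06"), ("apr13", "Apr13")] := by rfl

-- B's table lookup written out as the if-chain over the twelve lowercased keys
lemma lookup_eq (t : String) : PREFIX_TABLE.get? t =
    (if "jan26" == t then some "Jan26" else if "feb02" == t then some "Feb02"
     else if "feb09" == t then some "Feb09" else if "feb16" == t then some "Feb16"
     else if "feb23" == t then some "Feb23" else if "mar02" == t then some "Mar02"
     else if "mar09" == t then some "Mar09" else if "mar16" == t then some "Mar16"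
     else if "mar23" == t then some "Mar23" else if "mar30" == t then some "Mar30"
     else if "apr06" == t then some "Apr06" else if "apr13" == t then some "Apr13"
     else none) := by
  rw [tableP]
  simp only [PySem.Dict.get?_mk_cons]
  rfl

-- A's scan over the keys IS B's table lookup, for every v
lemma scan_eq_lookup (v : String) :
    prefixScan v WEEK_DATE_MAP.keys
    = PREFIX_TABLE.get? (PySem.Str.lower (PySem.Str.slice v none (some 5))) := by
  rw [keys_eq]
  simp only [prefixScan]
  rw [cond_eq v "Jan26" (by decide), cond_eq v "Feb02" (by decide), cond_eq v "Feb09" (by decide),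
    cond_eq v "Feb16" (by decide), cond_eq v "Feb23" (by decide), cond_eq v "Mar02" (by decide),
    cond_eq v "Mar09" (by decide), cond_eq v "Mar16" (by decide), cond_eq v "Mar23" (by decide),
    cond_eq v "Mar30" (by decide), cond_eq v "Apr06" (by decide), cond_eq v "Apr13" (by decide)]
  rw [lookup_eq]
  simp only [show PySem.Str.lower "Jan26" = "jan26" from rfl, show PySem.Str.lower "Feb02" = "feb02" from rfl,
    show PySem.Str.lower "Feb09" = "feb09" from rfl, show PySem.Str.lower "Feb16" = "feb16" from rfl,
    show PySem.Str.lower "Feb23" = "feb23" from rfl, show PySem.Str.lower "Mar02" = "mar02" from rfl,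
    show PySem.Str.lower "Mar09" = "mar09" from rfl, show PySem.Str.lower "Mar16" = "mar16" from rfl,
    show PySem.Str.lower "Mar23" = "mar23" from rfl, show PySem.Str.lower "Mar30" = "mar30" from rfl,
    show PySem.Str.lower "Apr06" = "apr06" from rfl, show PySem.Str.lower "Apr13" = "apr13" from rfl]

-- ===== VERDICT (by name: the statement is the Claim_ definition above) =====
theorem resolve_week_label_spec : Claim_equal_resolve_week_label := by
  intro raw _
  unfold Spec_resolve_week_label resolve_week_label resolve_week_label_alt
  cases h : clean_str raw with
  | none => rfl
  | some v =>
    by_cases hv : v == ""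
    · simp [hv]
    · simp only [hv, Bool.false_eq_true, if_false]
      by_cases hc : WEEK_DATE_MAP.contains v
      · have hkeys : "Jan26" = v ∨ "Feb02" = v ∨ "Feb09" = v ∨ "Feb16" = v ∨ "Feb23" = v ∨
            "Mar02" = v ∨ "Mar09" = v ∨ "Mar16" = v ∨ "Mar23" = v ∨ "Mar30" = v ∨
            "Apr06" = v ∨ "Apr13" = v := by
          simpa only [PySem.Dict.contains, items_eq, List.any_cons, List.any_nil,
            Bool.or_eq_true, Bool.or_false, beq_iff_eq] using hc
        rw [if_pos hc]
        rcases hkeys with h | h | h | h | h | h | h | h | h | h | h | h <;> subst h <;> rw [lookup_eq] <;> rfl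
      · rw [if_neg hc]
        exact scan_eq_lookup v
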